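-- pv_equiv track=rewrite | github.com/Hectorfl05/Proyecto_Anima_Backend | server/api/v1/routes/analytics.py | calculate_positive_negative_balance
-- ===== SOURCE A (Python) =====
-- from typing import Dict, List, Optional
--
-- def calculate_positive_negative_balance(emotion_counts: Dict[str, int]) -> Dict[str, int]:
--     """Calcular balance de emociones positivas vs negativas"""
--     positive_emotions = ['happy', 'energetic', 'relaxed']
--     negative_emotions = ['sad', 'angry']
--
--     positive_count = sum(emotion_counts.get(emotion, 0) for emotion in positive_emotions)
--     negative_count = sum(emotion_counts.get(emotion, 0) for emotion in negative_emotions)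
--
--     return {
--         "positive": positive_count,
--         "negative": negative_count
--     }
-- ===== SOURCE B (Python) =====
-- POSITIVE_EMOTIONS = {'happy', 'energetic', 'relaxed'}
-- NEGATIVE_EMOTIONS = {'sad', 'angry'}
--
-- def calculate_positive_negative_balance(emotion_counts):
--     """Single pass over the input dict, accumulating both totals."""
--     positive_total = 0
--     negative_total = 0
--     for emotion, count in emotion_counts.items():
--         if emotion in POSITIVE_EMOTIONS:
--             positive_total += count
--         elif emotion in NEGATIVE_EMOTIONS:
--             negative_total += count
--     return {"positive": positive_total, "negative": negative_total}
-- ===== Notes on version B (the rewrite author's own statement) =====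
-- stated objective: alternative
-- what changed: B makes one pass over the input dict's items, accumulating both totals against fixed membership sets, instead of A's two passes over the fixed key lists with repeated dict lookups.
import Mathlib
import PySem

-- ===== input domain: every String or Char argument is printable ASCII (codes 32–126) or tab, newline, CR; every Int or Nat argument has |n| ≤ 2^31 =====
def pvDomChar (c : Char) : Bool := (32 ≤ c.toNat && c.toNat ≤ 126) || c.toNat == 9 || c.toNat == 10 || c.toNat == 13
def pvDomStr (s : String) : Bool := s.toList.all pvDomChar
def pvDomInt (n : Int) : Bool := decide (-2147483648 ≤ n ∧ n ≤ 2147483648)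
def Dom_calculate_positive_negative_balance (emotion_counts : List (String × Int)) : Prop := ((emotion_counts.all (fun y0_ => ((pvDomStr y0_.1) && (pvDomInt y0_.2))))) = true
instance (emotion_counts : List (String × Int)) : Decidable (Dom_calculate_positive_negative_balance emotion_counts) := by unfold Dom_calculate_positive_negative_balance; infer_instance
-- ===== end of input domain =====

-- B replaces A's two passes over the fixed key lists (a dict lookup per key) by one
-- pass over the dict's items, accumulating both totals against fixed membership sets.

-- ===== PORT A =====
def calculate_positive_negative_balance (emotion_counts : List (String × Int)) : List (String × Int) :=
  let positive_emotions : List String := ["happy", "energetic", "relaxed"]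
  let negative_emotions : List String := ["sad", "angry"]
  let d : PySem.Dict String Int := PySem.Dict.mk emotion_counts
  let positive_count : Int := (positive_emotions.map (fun e => d.getD e 0)).sum
  let negative_count : Int := (negative_emotions.map (fun e => d.getD e 0)).sum
  [("positive", positive_count), ("negative", negative_count)]

-- ===== PORT B =====
def pvPosSet : PySem.Set String := PySem.Set.ofList ["happy", "energetic", "relaxed"]
def pvNegSet : PySem.Set String := PySem.Set.ofList ["sad", "angry"]

def calculate_positive_negative_balance_alt (emotion_counts : List (String × Int)) : List (String × Int) :=
  let totals : Int × Int := emotion_counts.foldl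
    (fun acc kv =>
      if PySem.Set.contains pvPosSet kv.1 then (acc.1 + kv.2, acc.2)
      else if PySem.Set.contains pvNegSet kv.1 then (acc.1, acc.2 + kv.2)
      else acc)
    (0, 0)
  [("positive", totals.1), ("negative", totals.2)]

-- ===== PRECONDITION & SPEC =====
-- Pre_ requires distinct keys: the Python argument is a dict, whose keys are necessarily
-- distinct, so this excludes no input the Python A accepts; on duplicate-key association
-- lists the dict model itself is ambiguous.
def Pre_calculate_positive_negative_balance (emotion_counts : List (String × Int)) : Prop :=
  (emotion_counts.map Prod.fst).Nodup
instance (emotion_counts : List (String × Int)) : Decidable (Pre_calculate_positive_negative_balance emotion_counts) := by unfold Pre_calculate_positive_negative_balance; infer_instance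
def pvWitness_calculate_positive_negative_balance : (List (String × Int)) := [("happy", 3), ("sad", 2), ("calm", 7)]

def Spec_calculate_positive_negative_balance (emotion_counts : List (String × Int)) (out : List (String × Int)) : Prop := out = calculate_positive_negative_balance_alt emotion_counts
instance (emotion_counts : List (String × Int)) (out : List (String × Int)) : Decidable (Spec_calculate_positive_negative_balance emotion_counts out) := by unfold Spec_calculate_positive_negative_balance; infer_instance

-- ===== CLAIM (what is proved, stated in full; the proofs are below) =====
def Claim_equal_calculate_positive_negative_balance : Prop := ∀ (emotion_counts : List (String × Int)), Dom_calculate_positive_negative_balance emotion_counts → Pre_calculate_positive_negative_balance emotion_counts → Spec_calculate_positive_negative_balance emotion_counts (calculate_positive_negative_balance emotion_counts)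

-- ===== LEMMAS AND PROOFS =====

-- getD of a key absent from the list is the default
theorem pv_getD_not_mem (l : List (String × Int)) (k : String)
    (h : k ∉ l.map Prod.fst) : (PySem.Dict.mk l).getD k 0 = 0 := by
  induction l with
  | nil => rfl
  | cons p rest ih =>
    obtain ⟨k', v⟩ := p
    simp only [List.map_cons, List.mem_cons, not_or] at h
    rw [PySem.Dict.getD_eq_get?_getD, PySem.Dict.get?_mk_cons]
    have hne : (k' == k) = false := by
      simp only [beq_eq_false_iff_ne, ne_eq]; exact fun he => h.1 he.symm
    rw [hne]
    simpa [PySem.Dict.getD_eq_get?_getD] using ih h.2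

-- the core invariant: B's fold computes A's two sums, for nodup keys
theorem pv_fold_eq (l : List (String × Int)) (h : (l.map Prod.fst).Nodup) (p n : Int) :
    l.foldl
      (fun acc kv =>
        if PySem.Set.contains pvPosSet kv.1 then (acc.1 + kv.2, acc.2)
        else if PySem.Set.contains pvNegSet kv.1 then (acc.1, acc.2 + kv.2)
        else acc)
      (p, n)
    = (p + ((["happy", "energetic", "relaxed"] : List String).map
              (fun e => (PySem.Dict.mk l).getD e 0)).sum,
       n + ((["sad", "angry"] : List String).map
              (fun e => (PySem.Dict.mk l).getD e 0)).sum) := by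
  induction l generalizing p n with
  | nil =>
    have hz : ∀ e : String, (PySem.Dict.mk ([] : List (String × Int))).getD e 0 = 0 :=
      fun _ => rfl
    simp [hz]
  | cons kv rest ih =>
    obtain ⟨k, v⟩ := kv
    simp only [List.map_cons, List.nodup_cons] at h
    have hget : ∀ e : String, (PySem.Dict.mk ((k, v) :: rest)).getD e 0
        = if k == e then v else (PySem.Dict.mk rest).getD e 0 := by
      intro e
      simp [PySem.Dict.getD_eq_get?_getD, PySem.Dict.get?_mk_cons]
      split <;> simp_all [PySem.Dict.getD_eq_get?_getD]
    have habs : k ∉ rest.map Prod.fst := h.1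
    simp only [List.foldl_cons, ih h.2]
    by_cases hh : k = "happy"
    · subst hh
      simp [hget, pv_getD_not_mem rest _ habs, pvPosSet, PySem.Set.ofList]
      omega
    · by_cases he : k = "energetic"
      · subst he
        simp [hget, pv_getD_not_mem rest _ habs, pvPosSet, PySem.Set.ofList]
        omega
      · by_cases hr : k = "relaxed"
        · subst hr
          simp [hget, pv_getD_not_mem rest _ habs, pvPosSet, PySem.Set.ofList]
          omega
        · by_cases hs : k = "sad"
          · subst hs
            simp [hget, pv_getD_not_mem rest _ habs, pvPosSet, pvNegSet, PySem.Set.ofList]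
            omega
          · by_cases ha : k = "angry"
            · subst ha
              simp [hget, pv_getD_not_mem rest _ habs, pvPosSet, pvNegSet, PySem.Set.ofList]
              omega
            · have h1 : PySem.Set.contains pvPosSet k = false := by
                simp [pvPosSet, PySem.Set.ofList, PySem.Set.contains]
                simp_all [beq_iff_eq]
              have h2 : PySem.Set.contains pvNegSet k = false := by
                simp [pvNegSet, PySem.Set.ofList, PySem.Set.contains]
                simp_all
              have hg : ∀ e ∈ (["happy", "energetic", "relaxed", "sad", "angry"] : List String),
                  (PySem.Dict.mk ((k, v) :: rest)).getD e 0 = (PySem.Dict.mk rest).getD e 0 := by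
                intro e hein
                rw [hget e]
                have : (k == e) = false := by
                  simp [beq_iff_eq]
                  fin_cases hein <;> simp_all
                rw [this]; rfl
              simp only [h1, h2, Bool.false_eq_true, if_false, List.map_cons, List.map_nil]
              rw [hg "happy" (by simp), hg "energetic" (by simp), hg "relaxed" (by simp),
                  hg "sad" (by simp), hg "angry" (by simp)]

-- ===== VERDICT (by name: the statement is the Claim_ definition above) =====
theorem calculate_positive_negative_balance_spec : Claim_equal_calculate_positive_negative_balance := by
  intro l _ hpre
  unfold Spec_calculate_positive_negative_balance
  unfold calculate_positive_negative_balance calculate_positive_negative_balance_alt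
  simp only [pv_fold_eq l hpre 0 0, zero_add]
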